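-- pv_equiv track=rewrite | github.com/sueszli/vector-database-benchmark | dataset/python-mutated/loop_basic_test.py | while_two_vars
-- ===== SOURCE A (Python) =====
-- def while_two_vars(n):
--     if False:
--         while True:
--             i = 10
--     s = 0
--     i = 0
--     while i < n:
--         s = s * 10 + i
--         i += 1
--     return s
-- ===== SOURCE B (Python) =====
-- def while_two_vars(n):
--     # Build the power-sum back-to-front: visit positions n-1, n-2, ..., 0 and
--     # add i * 10**(n-1-i) for each, maintaining the power in a running
--     # accumulator p instead of Horner-folding the partial value (s = s*10 + i).
--     s = 0
--     p = 1
--     for i in range(n - 1, -1, -1):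
--         s += i * p
--         p *= 10
--     return s
-- ===== Notes on version B (the rewrite author's own statement) =====
-- stated objective: alternative
-- what changed: Replaces the forward Horner fold s = s*10 + i with a back-to-front power-sum: iterate i from n-1 down to 0, maintaining a running power accumulator p = 10^(n-1-i) and summing the independent terms i*p.
import Mathlib
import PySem

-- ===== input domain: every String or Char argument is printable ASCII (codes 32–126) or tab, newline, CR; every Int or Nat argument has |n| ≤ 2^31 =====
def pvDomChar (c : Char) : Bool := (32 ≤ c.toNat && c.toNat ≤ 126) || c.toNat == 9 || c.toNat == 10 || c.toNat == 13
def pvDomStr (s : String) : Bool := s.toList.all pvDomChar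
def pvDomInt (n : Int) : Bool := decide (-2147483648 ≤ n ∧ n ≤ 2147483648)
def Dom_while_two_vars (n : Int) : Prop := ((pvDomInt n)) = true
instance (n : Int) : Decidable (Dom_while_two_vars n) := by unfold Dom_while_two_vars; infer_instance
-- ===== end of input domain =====

-- B replaces A's forward Horner fold (s = s*10 + i) with a back-to-front power-sum
-- keeping a running power accumulator; same cost, different traversal and state.


-- ===== PORT A =====
-- the 'while i < n' loop of A, carrying the same state (s, i)
def whileTwoVarsLoop (n s i : Int) : Int :=
  if i < n then whileTwoVarsLoop n (s * 10 + i) (i + 1) else s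
  termination_by (n - i).toNat
  decreasing_by omega

def while_two_vars (n : Int) : Int :=
  -- the 'if False: while True: i = 10' block is dead code and has no effect
  whileTwoVarsLoop n 0 0

-- ===== PORT B =====
def while_two_vars_alt (n : Int) : Int :=
  -- for i in range(n-1, -1, -1): s += i*p; p *= 10
  ((PySem.List.pyRange (n - 1) (-1) (-1)).foldl
      (fun (sp : Int × Int) i => (sp.1 + i * sp.2, sp.2 * 10)) (0, 1)).1

-- ===== PRECONDITION & SPEC =====
def Spec_while_two_vars (n : Int) (out : Int) : Prop := out = while_two_vars_alt n
instance (n : Int) (out : Int) : Decidable (Spec_while_two_vars n out) := by unfold Spec_while_two_vars; infer_instance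

-- ===== CLAIM (what is proved, stated in full; the proofs are below) =====
def Claim_equal_while_two_vars : Prop := ∀ (n : Int), Dom_while_two_vars n → Spec_while_two_vars n (while_two_vars n)

-- ===== LEMMAS AND PROOFS =====

-- the common closed form both loops compute: sum of j * 10^(m-j) for 0 ≤ j ≤ m
def pvT (m : Int) : Int :=
  ((PySem.List.pyRange 0 (m + 1) 1).map (fun j => j * 10 ^ (m - j).toNat)).sum

theorem pvT_rec (m : Int) (hm : 0 ≤ m) : pvT m = 10 * pvT (m - 1) + m := by
  unfold pvT
  rw [show m + 1 = m + 1 by ring, PySem.List.pyRange_one_succ_right (by omega)]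
  rw [List.map_append, List.sum_append]
  have hmap : (PySem.List.pyRange 0 m 1).map (fun j => j * 10 ^ (m - j).toNat)
      = (PySem.List.pyRange 0 m 1).map (fun j => 10 * (j * 10 ^ (m - 1 - j).toNat)) := by
    apply List.map_congr_left
    intro j hj
    rw [PySem.List.mem_pyRange_one] at hj
    have : (m - j).toNat = (m - 1 - j).toNat + 1 := by omega
    rw [this, pow_succ]
    ring
  rw [hmap, List.sum_map_mul_left]
  have : m - 1 + 1 = m := by ring
  simp [this]

-- loop invariant for A: the Horner accumulator s weighs by 10^(remaining steps)
theorem whileTwoVarsLoop_eq (n : Int) : ∀ (k : Nat) (i s : Int), (n - i).toNat = k →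
    whileTwoVarsLoop n s i
      = s * 10 ^ (n - i).toNat
        + ((PySem.List.pyRange i n 1).map (fun j => j * 10 ^ (n - 1 - j).toNat)).sum := by
  intro k
  induction k with
  | zero =>
    intro i s hk
    rw [whileTwoVarsLoop]
    rw [if_neg (by omega), PySem.List.pyRange_one_eq_nil (by omega)]
    simp [hk]
  | succ m ih =>
    intro i s hk
    rw [whileTwoVarsLoop]
    rw [if_pos (by omega), PySem.List.pyRange_one_cons (by omega)]
    rw [ih (i + 1) (s * 10 + i) (by omega)]
    have h1 : (n - i).toNat = (n - (i + 1)).toNat + 1 := by omega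
    rw [h1, pow_succ]
    simp
    ring_nf

-- loop invariant for B: the countdown fold from (s, p) yields s + p * pvT m
theorem altLoop_eq : ∀ (k : Nat) (m s p : Int), (m + 1).toNat = k →
    ((PySem.List.pyRange m (-1) (-1)).foldl
        (fun (sp : Int × Int) i => (sp.1 + i * sp.2, sp.2 * 10)) (s, p)).1
      = s + p * pvT m := by
  intro k
  induction k with
  | zero =>
    intro m s p hk
    rw [PySem.List.pyRange_neg_one_eq_nil (by omega)]
    unfold pvT
    rw [PySem.List.pyRange_one_eq_nil (by omega)]
    simp
  | succ t ih =>
    intro m s p hk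
    rw [PySem.List.pyRange_neg_one_cons (by omega)]
    rw [List.foldl_cons]
    rw [ih (m - 1) (s + m * p) (p * 10) (by omega)]
    rw [pvT_rec m (by omega)]
    ring

-- ===== VERDICT (by name: the statement is the Claim_ definition above) =====
theorem while_two_vars_spec : Claim_equal_while_two_vars := by
  intro n _
  unfold Spec_while_two_vars while_two_vars while_two_vars_alt
  rw [whileTwoVarsLoop_eq n ((n - 0).toNat) 0 0 rfl]
  rw [altLoop_eq ((n - 1 + 1).toNat) (n - 1) 0 1 rfl]
  have h : pvT (n - 1)
      = ((PySem.List.pyRange 0 n 1).map (fun j => j * 10 ^ (n - 1 - j).toNat)).sum := by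
    unfold pvT
    have : n - 1 + 1 = n := by ring
    rw [this]
  rw [h]
  simp
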